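-- pv_equiv track=rewrite | github.com/absognety/Competitive-Coding-Platforms | CodeSignal/ZigZagPairs.py | solution
-- ===== SOURCE A (Python) =====
-- def solution(numbers):
--     size_of_numbers = len(numbers)
--     if len(set(numbers)) == 1:
--         return [0]
--     indicators = []
--     for index in range(size_of_numbers-1):
--         if numbers[index+1] > numbers[index]:
--             indicators.append(True)
--         else:
--             indicators.append(False)
--     if len(set(indicators)) == 1:
--         if True in indicators:
--             if size_of_numbers % 2 == 0:
--                 return [0] * (size_of_numbers // 2)
--             elif size_of_numbers % 2 == 1:
--                 return [0] * ((size_of_numbers // 2) + 1)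
--     output = []
--     for index in range(size_of_numbers-2):
--         if (numbers[index] < numbers[index+1]) & (numbers[index+1] > numbers[index+2]):
--             output.append(1)
--         elif (numbers[index] > numbers[index+1]) & (numbers[index+1] < numbers[index+2]):
--             output.append(1)
--         else:
--             output.append(0)
--     return output
-- ===== SOURCE B (Python) =====
-- def _rle(xs):
--     # run-length encode: list of (value, run length)
--     runs = []
--     i = 0
--     while i < len(xs):
--         j = i + 1
--         while j < len(xs) and xs[j] == xs[i]:
--             j += 1
--         runs.append((xs[i], j - i))
--         i = j
--     return runs
--
--
-- def _emit(runs):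
--     # emit the zigzag bits block by block: each run contributes l-1 zeros,
--     # each boundary between runs of opposite strict signs contributes a 1
--     out = []
--     i = 0
--     while i + 1 < len(runs):
--         s, l = runs[i]
--         out += [0] * (l - 1)
--         out.append(1 if s * runs[i + 1][0] == -1 else 0)
--         i += 1
--     if runs:
--         out += [0] * (runs[-1][1] - 1)
--     return out
--
--
-- def solution(numbers):
--     dirs = [(b > a) - (b < a) for a, b in zip(numbers, numbers[1:])]
--     runs = _rle(dirs)
--     if numbers and (not runs or (len(runs) == 1 and runs[0][0] == 0)):
--         return [0]
--     if len(runs) == 1 and runs[0][0] == 1: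
--         return [0] * ((len(numbers) + 1) // 2)
--     return _emit(runs)
-- ===== Notes on version B (the rewrite author's own statement) =====
-- stated objective: alternative
-- what changed: B run-length encodes the direction sequence into (sign, length) runs and drives everything from that encoding: the all-equal and strictly-ascending guards become shape checks on the run list, and the output is emitted block by block (l-1 zeros per run, one boundary bit per pair of adjacent runs), instead of A's set()-based guards and triple-by-triple re-read of numbers.
import Mathlib
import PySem

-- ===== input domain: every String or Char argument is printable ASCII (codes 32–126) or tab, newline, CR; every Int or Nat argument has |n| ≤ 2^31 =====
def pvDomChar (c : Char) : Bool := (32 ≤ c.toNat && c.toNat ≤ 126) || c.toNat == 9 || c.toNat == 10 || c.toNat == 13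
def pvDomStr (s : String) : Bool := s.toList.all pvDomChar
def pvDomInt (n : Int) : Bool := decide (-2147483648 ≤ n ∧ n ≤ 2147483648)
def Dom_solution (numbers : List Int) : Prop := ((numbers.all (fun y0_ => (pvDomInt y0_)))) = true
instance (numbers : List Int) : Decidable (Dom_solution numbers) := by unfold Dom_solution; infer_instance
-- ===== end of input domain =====

-- B run-length encodes the direction sequence and derives guards and output from the run list
-- (shape checks + block emission) instead of A's set() guards and triple re-read (objective: alternative).


-- ===== PORT A =====
def solution (numbers : List Int) : List Int :=
  let n : Int := numbers.length
  if (PySem.Set.ofList numbers).length = 1 then [0]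
  else
    let indicators : List Bool :=
      (PySem.List.pyRange 0 (n - 1) 1).map (fun index =>
        decide (PySem.List.pyGetD numbers (index + 1) 0 > PySem.List.pyGetD numbers index 0))
    if (PySem.Set.ofList indicators).length = 1 ∧ indicators.contains true then
      if PySem.Int.mod n 2 = 0 then List.replicate (PySem.Int.floordiv n 2).toNat 0
      else List.replicate (PySem.Int.floordiv n 2 + 1).toNat 0
    else
      (PySem.List.pyRange 0 (n - 2) 1).map (fun index =>
        if PySem.List.pyGetD numbers index 0 < PySem.List.pyGetD numbers (index + 1) 0 ∧
           PySem.List.pyGetD numbers (index + 1) 0 > PySem.List.pyGetD numbers (index + 2) 0 then 1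
        else if PySem.List.pyGetD numbers index 0 > PySem.List.pyGetD numbers (index + 1) 0 ∧
                PySem.List.pyGetD numbers (index + 1) 0 < PySem.List.pyGetD numbers (index + 2) 0 then 1
        else 0)

-- ===== PORT B =====
-- run-length encoding of a list: (value, run length) pairs (python _rle, while-count = takeWhile count)
def rleB : List Int → List (Int × Nat)
  | [] => []
  | d :: rest =>
      (d, 1 + (rest.takeWhile (· == d)).length) :: rleB (rest.dropWhile (· == d))
  termination_by xs => xs.length
  decreasing_by
    simp only [List.length_cons]
    have := List.length_dropWhile_le (· == d) rest
    omega

-- python _emit: each run contributes l-1 zeros, each run boundary one bit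
def emitB : List (Int × Nat) → List Int
  | [] => []
  | [(_, l)] => List.replicate (l - 1) 0
  | (s, l) :: (t, m) :: rest =>
      List.replicate (l - 1) 0 ++ (if s * t = -1 then (1 : Int) else 0) :: emitB ((t, m) :: rest)

def solution_alt (numbers : List Int) : List Int :=
  let dirs : List Int :=
    (numbers.zip (PySem.List.slice numbers (some 1) none)).map
      (fun p => (if p.2 > p.1 then (1 : Int) else 0) - (if p.2 < p.1 then 1 else 0))
  let runs := rleB dirs
  if numbers ≠ [] ∧ (runs = [] ∨ (runs.length = 1 ∧ (runs.headD (0, 0)).1 = 0)) then [0]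
  else if runs.length = 1 ∧ (runs.headD (0, 0)).1 = 1 then
    List.replicate (PySem.Int.floordiv ((numbers.length : Int) + 1) 2).toNat 0
  else emitB runs

-- ===== PRECONDITION & SPEC =====
def Spec_solution (numbers : List Int) (out : List Int) : Prop := out = solution_alt numbers
instance (numbers : List Int) (out : List Int) : Decidable (Spec_solution numbers out) := by unfold Spec_solution; infer_instance

-- ===== CLAIM (what is proved, stated in full; the proofs are below) =====
def Claim_equal_solution : Prop := ∀ (numbers : List Int), Dom_solution numbers → Spec_solution numbers (solution numbers)

-- ===== LEMMAS AND PROOFS =====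

def signB (x : Int) : Int := if x > 0 then 1 else if x < 0 then -1 else 0

def dirsOf (xs : List Int) : List Int := (xs.zip xs.tail).map (fun p => signB (p.2 - p.1))

def zigMap (xs : List Int) : List Int :=
  (xs.zip xs.tail).map (fun p => if p.1 * p.2 = -1 then (1 : Int) else 0)

theorem signB_beq_one (x : Int) : (signB x == 1) = decide (0 < x) := by
  unfold signB; split_ifs <;> simp <;> omega

theorem length_dirsOf (xs : List Int) : (dirsOf xs).length = xs.length - 1 := by
  simp [dirsOf]

theorem getElem_dirsOf (xs : List Int) (k : Nat) (h : k < (dirsOf xs).length) :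
    (dirsOf xs)[k] =
      signB (xs[k + 1]'(by rw [length_dirsOf] at h; omega) -
             xs[k]'(by rw [length_dirsOf] at h; omega)) := by
  simp [dirsOf, List.getElem_zip, List.getElem_tail]

def indicatorsOf (xs : List Int) : List Bool :=
  (PySem.List.pyRange 0 ((xs.length : Int) - 1) 1).map (fun index =>
    decide (PySem.List.pyGetD xs (index + 1) 0 > PySem.List.pyGetD xs index 0))

theorem indicators_eq (xs : List Int) :
    indicatorsOf xs = (dirsOf xs).map (fun d => d == 1) := by
  apply List.ext_getElem
  · simp [indicatorsOf, dirsOf, PySem.List.length_pyRange_one]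
  · intro k h1 h2
    have hk : k < xs.length - 1 := by
      have h1' := h1
      simp [indicatorsOf, PySem.List.length_pyRange_one] at h1'
      omega
    have hk1 : k + 1 < xs.length := by omega
    have hkl : k < xs.length := by omega
    simp only [indicatorsOf, List.getElem_map, PySem.List.getElem_pyRange_one, zero_add]
    rw [show ((k : Int) + 1) = ((k + 1 : Nat) : Int) by push_cast; ring]
    rw [PySem.List.pyGetD_natCast, PySem.List.pyGetD_natCast]
    rw [List.getD_eq_getElem xs 0 hk1, List.getD_eq_getElem xs 0 hkl]
    rw [getElem_dirsOf xs k (by rwa [List.length_map] at h2), signB_beq_one]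
    simp

theorem boolset_guard (l : List Bool) :
    ((PySem.Set.ofList l).length = 1 ∧ l.contains true) ↔ (l ≠ [] ∧ ∀ b ∈ l, b = true) := by
  have hmem : ∀ b, b ∈ PySem.Set.ofList l ↔ b ∈ l := fun b => PySem.Set.mem_ofList l b
  have hnd : (PySem.Set.ofList l).Nodup := PySem.Set.nodup_ofList l
  constructor
  · rintro ⟨hlen, hc⟩
    have htr : true ∈ l := by simpa using hc
    obtain ⟨a, ha⟩ := List.length_eq_one_iff.mp hlen
    have hat : a = true := by
      have := (hmem true).mpr htr
      rw [ha] at this; simpa using this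
    refine ⟨by rintro rfl; simp at htr, fun b hb => ?_⟩
    have := (hmem b).mpr hb
    rw [ha, hat] at this; simpa using this
  · rintro ⟨hne, hall⟩
    have htr : true ∈ l := by
      cases l with
      | nil => simp at hne
      | cons b t => have := hall b (by simp); simp [this]
    have htr' : true ∈ PySem.Set.ofList l := (hmem true).mpr htr
    refine ⟨?_, by simpa using htr⟩
    match hs : PySem.Set.ofList l with
    | [] => rw [hs] at htr'; simp at htr'
    | [a] => rfl
    | a :: b :: t =>
      rw [hs] at hmem hnd
      have ha : a = true := hall a ((hmem a).mp (by simp))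
      have hb : b = true := hall b ((hmem b).mp (by simp))
      rw [List.nodup_cons] at hnd
      exact absurd (by simp [ha, hb] : a ∈ b :: t) hnd.1

theorem intset_guard (l : List Int) :
    (PySem.Set.ofList l).length = 1 ↔ (l ≠ [] ∧ ∀ b ∈ l, b = l.headD 0) := by
  have hmem : ∀ b, b ∈ PySem.Set.ofList l ↔ b ∈ l := fun b => PySem.Set.mem_ofList l b
  have hnd : (PySem.Set.ofList l).Nodup := PySem.Set.nodup_ofList l
  constructor
  · intro hlen
    obtain ⟨a, ha⟩ := List.length_eq_one_iff.mp hlen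
    have hne : l ≠ [] := by
      intro h; rw [h] at ha; simp [PySem.Set.ofList] at ha
    have hhead : l.headD 0 ∈ l := by
      cases l with
      | nil => simp at hne
      | cons x t => simp
    have hha : l.headD 0 = a := by
      have := (hmem (l.headD 0)).mpr hhead
      rw [ha] at this; simpa using this
    refine ⟨hne, fun b hb => ?_⟩
    have := (hmem b).mpr hb
    rw [ha] at this
    have hba : b = a := by simpa using this
    rw [hba, hha]
  · rintro ⟨hne, hall⟩
    have hhead : l.headD 0 ∈ l := by
      cases l with
      | nil => simp at hne
      | cons x t => simp
    have htr' : l.headD 0 ∈ PySem.Set.ofList l := (hmem _).mpr hhead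
    match hs : PySem.Set.ofList l with
    | [] => rw [hs] at htr'; simp at htr'
    | [a] => rfl
    | a :: b :: t =>
      rw [hs] at hmem hnd
      have ha : a = l.headD 0 := hall a ((hmem a).mp (by simp))
      have hb : b = l.headD 0 := hall b ((hmem b).mp (by simp))
      rw [List.nodup_cons] at hnd
      exact absurd (by simp [ha, hb] : a ∈ b :: t) hnd.1

theorem signB_eq_zero (x : Int) : signB x = 0 ↔ x = 0 := by
  unfold signB
  split_ifs with h1 h2
  · omega
  · constructor
    · intro hh
      norm_num at hh
    · intro hh
      omega
  · omega

theorem alleq_iff_dirs_zero (xs : List Int) (hne : xs ≠ []) :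
    (∀ b ∈ xs, b = xs.headD 0) ↔ (∀ d ∈ dirsOf xs, d = 0) := by
  induction xs with
  | nil => simp at hne
  | cons a rest ih =>
    cases rest with
    | nil => simp [dirsOf]
    | cons b t =>
      have hd : dirsOf (a :: b :: t) = signB (b - a) :: dirsOf (b :: t) := by
        simp [dirsOf]
      rw [hd]
      have ih' := ih (by simp)
      constructor
      · intro h d hdm
        rcases List.mem_cons.mp hdm with rfl | hdm
        · rw [signB_eq_zero]
          have hb := h b (by simp)
          simp at hb; omega
        · have hb := h b (by simp)
          simp at hb
          refine (ih'.mp ?_) d hdm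
          intro c hc
          have := h c (List.mem_cons_of_mem a hc)
          simp at this ⊢; omega
      · intro h c hc
        have h0 : b = a := by
          have := h (signB (b - a)) (by simp)
          rw [signB_eq_zero] at this; omega
        have hrest := ih'.mpr (fun d hd => h d (List.mem_cons_of_mem _ hd))
        rcases List.mem_cons.mp hc with rfl | hc
        · simp
        · have := hrest c hc
          simp at this ⊢; omega

theorem rle_flatten (xs : List Int) :
    (rleB xs).flatMap (fun p => List.replicate p.2 p.1) = xs := by
  induction xs using rleB.induct with
  | case1 => simp [rleB]
  | case2 d rest ih =>
    rw [rleB]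
    simp only [List.flatMap_cons]
    rw [ih]
    have ht : rest.takeWhile (· == d) = List.replicate (rest.takeWhile (· == d)).length d := by
      apply List.eq_replicate_of_mem
      intro b hb
      have := List.mem_takeWhile_imp hb
      simpa using this
    have : List.replicate (1 + (rest.takeWhile (· == d)).length) d =
        d :: rest.takeWhile (· == d) := by
      rw [List.replicate_add]
      simp [← ht]
    rw [this]
    simp [List.takeWhile_append_dropWhile]

theorem rle_const (s : Int) (xs : List Int) (hne : xs ≠ []) (h : ∀ d ∈ xs, d = s) :
    rleB xs = [(s, xs.length)] := by
  cases xs with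
  | nil => simp at hne
  | cons a rest =>
    have ha : a = s := h a (by simp)
    have htw : rest.takeWhile (· == a) = rest := by
      rw [List.takeWhile_eq_self_iff]
      intro b hb
      have := h b (List.mem_cons_of_mem a hb)
      simp [this, ha]
    have hdw : rest.dropWhile (· == a) = [] := by
      rw [List.dropWhile_eq_nil_iff]
      intro b hb
      have := h b (List.mem_cons_of_mem a hb)
      simp [this, ha]
    rw [rleB, htw, hdw, rleB]
    simp [ha, Nat.add_comm]

theorem rle_single (xs : List Int) (s : Int) (l : Nat) (h : rleB xs = [(s, l)]) :
    xs ≠ [] ∧ ∀ d ∈ xs, d = s := by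
  have hf := rle_flatten xs
  rw [h] at hf
  simp only [List.flatMap_cons, List.flatMap_nil, List.append_nil] at hf
  constructor
  · intro hx
    rw [hx, rleB] at h; simp at h
  · intro d hd
    rw [← hf] at hd
    exact (List.eq_of_mem_replicate hd)

theorem rle_guard_zero (ds : List Int) :
    (rleB ds = [] ∨ ((rleB ds).length = 1 ∧ ((rleB ds).headD (0, 0)).1 = 0)) ↔
      (∀ d ∈ ds, d = 0) := by
  constructor
  · rintro (h | ⟨h1, h2⟩)
    · intro d hd
      have hf := rle_flatten ds
      rw [h] at hf
      simp only [List.flatMap_nil] at hf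
      rw [← hf] at hd
      simp at hd
    · obtain ⟨p, hp⟩ := List.length_eq_one_iff.mp h1
      rw [hp] at h2; simp at h2
      have := rle_single ds p.1 p.2 (by rw [hp])
      intro d hd
      have := this.2 d hd
      omega
  · intro h
    cases hds : ds with
    | nil => left; simp [rleB]
    | cons a rest =>
      right
      have hcon := rle_const 0 ds (by simp [hds]) h
      rw [← hds, hcon]
      simp

theorem rle_guard_one (ds : List Int) :
    ((rleB ds).length = 1 ∧ ((rleB ds).headD (0, 0)).1 = 1) ↔
      (ds ≠ [] ∧ ∀ d ∈ ds, d = 1) := by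
  constructor
  · rintro ⟨h1, h2⟩
    obtain ⟨p, hp⟩ := List.length_eq_one_iff.mp h1
    rw [hp] at h2; simp at h2
    have hs := rle_single ds p.1 p.2 (by rw [hp])
    exact ⟨hs.1, fun d hd => by have := hs.2 d hd; omega⟩
  · rintro ⟨hne, h⟩
    rw [rle_const 1 ds hne h]
    simp

theorem zig_cons (a b : Int) (rest : List Int) :
    zigMap (a :: b :: rest) = (if a * b = -1 then (1 : Int) else 0) :: zigMap (b :: rest) := by
  simp [zigMap]

theorem zig_const_prefix (d : Int) (t ys : List Int) (ht : ∀ x ∈ t, x = d) :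
    zigMap (d :: (t ++ ys)) = List.replicate t.length 0 ++ zigMap (d :: ys) := by
  induction t with
  | nil => simp
  | cons x t' ih =>
    have hx : x = d := ht x (by simp)
    subst hx
    rw [List.cons_append, zig_cons]
    have hdd : ¬ (x * x = -1) := by nlinarith [mul_self_nonneg x]
    rw [if_neg hdd, ih (fun y hy => ht y (List.mem_cons_of_mem x hy))]
    simp [List.replicate_succ]

theorem emitB_single (s : Int) (l : Nat) : emitB [(s, l)] = List.replicate (l - 1) 0 := rfl

theorem emitB_cons_cons (s : Int) (l : Nat) (q : Int × Nat) (rs : List (Int × Nat)) :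
    emitB ((s, l) :: q :: rs) =
      List.replicate (l - 1) 0 ++ (if s * q.1 = -1 then (1 : Int) else 0) :: emitB (q :: rs) := by
  cases q; rfl

theorem emit_rle (ds : List Int) : emitB (rleB ds) = zigMap ds := by
  induction ds using rleB.induct with
  | case1 => simp [rleB, emitB, zigMap]
  | case2 d rest ih =>
    obtain ⟨T, hT⟩ : ∃ T, T = rest.takeWhile (· == d) := ⟨_, rfl⟩
    obtain ⟨U, hU⟩ : ∃ U, U = rest.dropWhile (· == d) := ⟨_, rfl⟩
    have hrest : rest = T ++ U := by rw [hT, hU, List.takeWhile_append_dropWhile]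
    have ht : ∀ x ∈ T, x = d := by
      intro x hx
      rw [hT] at hx
      simpa using List.mem_takeWhile_imp hx
    rw [← hU] at ih
    rw [rleB, ← hT, ← hU]
    cases U with
    | nil =>
      rw [show rleB ([] : List Int) = [] from by rw [rleB], emitB_single]
      have hlen : 1 + T.length - 1 = T.length := by omega
      rw [hlen]
      conv_rhs => rw [hrest, show (T ++ ([] : List Int)) = T ++ ([] : List Int) from rfl]
      rw [zig_const_prefix d T [] ht]
      simp [zigMap]
    | cons e u' =>
      obtain ⟨q, rs, hq, hqe⟩ :
          ∃ q rs, rleB (e :: u') = q :: rs ∧ q.1 = e := by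
        rw [rleB]; exact ⟨_, _, rfl, rfl⟩
      rw [hq, emitB_cons_cons, ← hq, ih, hqe]
      have hlen : 1 + T.length - 1 = T.length := by omega
      rw [hlen]
      conv_rhs => rw [hrest]
      rw [zig_const_prefix d T (e :: u') ht, zig_cons]

theorem cell (a b c : Int) :
    (if signB (b - a) * signB (c - b) = -1 then (1 : Int) else 0) =
      (if a < b ∧ b > c then (1 : Int) else if a > b ∧ b < c then 1 else 0) := by
  unfold signB; split_ifs <;> omega

theorem main_eq (xs : List Int) :
    ((PySem.List.pyRange 0 ((xs.length : Int) - 2) 1).map (fun index =>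
        if PySem.List.pyGetD xs index 0 < PySem.List.pyGetD xs (index + 1) 0 ∧
           PySem.List.pyGetD xs (index + 1) 0 > PySem.List.pyGetD xs (index + 2) 0 then (1 : Int)
        else if PySem.List.pyGetD xs index 0 > PySem.List.pyGetD xs (index + 1) 0 ∧
                PySem.List.pyGetD xs (index + 1) 0 < PySem.List.pyGetD xs (index + 2) 0 then 1
        else 0))
    = zigMap (dirsOf xs) := by
  apply List.ext_getElem
  · simp [PySem.List.length_pyRange_one, zigMap, length_dirsOf]; omega
  · intro k h1 h2
    have hk : k < xs.length - 2 := by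
      have h1' := h1
      simp [PySem.List.length_pyRange_one] at h1'
      omega
    have h0 : k < xs.length := by omega
    have hA : k + 1 < xs.length := by omega
    have hB : k + 2 < xs.length := by omega
    have hd1 : k < (dirsOf xs).length := by rw [length_dirsOf]; omega
    have hd2 : k + 1 < (dirsOf xs).length := by rw [length_dirsOf]; omega
    simp only [zigMap, List.getElem_map, PySem.List.getElem_pyRange_one, zero_add,
      List.getElem_zip, List.getElem_tail]
    rw [show ((k : Int) + 1) = ((k + 1 : Nat) : Int) by push_cast; ring,
        show ((k : Int) + 2) = ((k + 2 : Nat) : Int) by push_cast; ring]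
    rw [PySem.List.pyGetD_natCast, PySem.List.pyGetD_natCast, PySem.List.pyGetD_natCast]
    rw [List.getD_eq_getElem xs 0 h0, List.getD_eq_getElem xs 0 hA, List.getD_eq_getElem xs 0 hB]
    rw [getElem_dirsOf xs k hd1, getElem_dirsOf xs (k + 1) hd2]
    exact (cell xs[k] xs[k + 1] xs[k + 2]).symm

theorem count_eq (n : Nat) (h : 1 ≤ n) :
    (if PySem.Int.mod (n : Int) 2 = 0 then List.replicate (PySem.Int.floordiv (n : Int) 2).toNat (0 : Int)
     else List.replicate (PySem.Int.floordiv (n : Int) 2 + 1).toNat 0)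
    = List.replicate (PySem.Int.floordiv ((n : Int) + 1) 2).toNat 0 := by
  rw [PySem.Int.mod_eq_emod_of_pos (by omega), PySem.Int.floordiv_eq_ediv_of_pos (by omega),
      PySem.Int.floordiv_eq_ediv_of_pos (by omega)]
  split_ifs with h2 <;> (congr 1; omega)

theorem dirs_alt_eq (xs : List Int) :
    (xs.zip xs.tail).map
        (fun p => (if p.2 > p.1 then (1 : Int) else 0) - (if p.2 < p.1 then 1 else 0)) =
      dirsOf xs := by
  unfold dirsOf
  apply List.map_congr_left
  intro p _
  unfold signB
  split_ifs <;> omega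

theorem solution_eq_alt (numbers : List Int) : solution numbers = solution_alt numbers := by
  unfold solution solution_alt
  simp only [PySem.List.slice_from_one, dirs_alt_eq]
  set ds := dirsOf numbers with hds
  -- guard 1
  have hg1 : (PySem.Set.ofList numbers).length = 1 ↔
      (numbers ≠ [] ∧ (rleB ds = [] ∨ ((rleB ds).length = 1 ∧ ((rleB ds).headD (0, 0)).1 = 0))) := by
    rw [intset_guard, rle_guard_zero]
    constructor
    · rintro ⟨hne, hall⟩
      exact ⟨hne, (alleq_iff_dirs_zero numbers hne).mp hall⟩
    · rintro ⟨hne, hall⟩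
      exact ⟨hne, (alleq_iff_dirs_zero numbers hne).mpr hall⟩
  by_cases h1 : (PySem.Set.ofList numbers).length = 1
  · rw [if_pos h1, if_pos (hg1.mp h1)]
  · rw [if_neg h1, if_neg (fun hc => h1 (hg1.mpr hc))]
    -- guard 2
    have hind : ((PySem.Set.ofList (indicatorsOf numbers)).length = 1 ∧
        (indicatorsOf numbers).contains true) ↔
        ((rleB ds).length = 1 ∧ ((rleB ds).headD (0, 0)).1 = 1) := by
      rw [boolset_guard, indicators_eq, rle_guard_one]
      constructor
      · rintro ⟨hne, hall⟩
        refine ⟨by simpa [hds] using hne, ?_⟩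
        intro d hd
        have := hall (d == 1) (List.mem_map_of_mem hd)
        simpa using this
      · rintro ⟨hne, hall⟩
        refine ⟨by simpa [hds] using hne, ?_⟩
        intro b hb
        obtain ⟨d, hd, rfl⟩ := List.mem_map.mp hb
        simp [hall d hd]
    show (if ((PySem.Set.ofList (indicatorsOf numbers)).length = 1 ∧
        (indicatorsOf numbers).contains true) then _ else _) = _
    by_cases h2 : ((rleB ds).length = 1 ∧ ((rleB ds).headD (0, 0)).1 = 1)
    · rw [if_pos (hind.mpr h2), if_pos h2]
      have hne : ds ≠ [] := ((rle_guard_one ds).mp h2).1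
      have hpos : 0 < ds.length := List.length_pos_of_ne_nil hne
      rw [hds, length_dirsOf] at hpos
      exact count_eq numbers.length (by omega)
    · rw [if_neg (fun hc => h2 (hind.mp hc)), if_neg h2]
      rw [emit_rle, hds]
      exact main_eq numbers

-- ===== VERDICT (by name: the statement is the Claim_ definition above) =====
theorem solution_spec : Claim_equal_solution := by
  intro numbers _
  unfold Spec_solution
  exact solution_eq_alt numbers
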